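-- pv_equiv track=rewrite | github.com/jachetheboss/Programming | Project Euler/66_diophantine_equation.py | mergeFactors
-- ===== SOURCE A (Python) =====
-- def mergeFactors(fz1, fz2):
--     fz = []
--     i = 0
--     j = 0
--     while i < len(fz1) or j < len(fz2):
--         if i == len(fz1):
--             fz.append(fz2[j])
--             fz.append(fz2[j + 1])
--             j += 2
--         elif j == len(fz2):
--             fz.append(fz1[i])
--             fz.append(fz1[i + 1])
--             i += 2
--         elif fz1[i] == fz2[j]:
--             fz.append(fz1[i])
--             fz.append(fz1[i + 1] + fz2[j + 1])
--             i += 2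
--             j += 2
--         elif fz1[i] < fz2[j]:
--             fz.append(fz1[i])
--             fz.append(fz1[i + 1])
--             i += 2
--         else: # fz1[i] > fz2[j]
--             fz.append(fz2[j])
--             fz.append(fz2[j + 1])
--
--             j += 2
--     return fz
-- ===== SOURCE B (Python) =====
-- def mergeFactors(fz1, fz2):
--     out = []
--     while fz1 and fz2:
--         (p1, e1), (p2, e2) = fz1[:2], fz2[:2]
--         if p1 < p2:
--             out += (p1, e1)
--             fz1 = fz1[2:]
--         elif p2 < p1:
--             out += (p2, e2)
--             fz2 = fz2[2:]
--         else:
--             out += (p1, e1 + e2)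
--             fz1, fz2 = fz1[2:], fz2[2:]
--     return out + fz1 + fz2
-- ===== Notes on version B (the rewrite author's own statement) =====
-- stated objective: simpler
-- what changed: Replaced A's index-synchronized while loop (i/j counters stepped by 2, per-iteration exhaustion branches testing i == len(fz1) / j == len(fz2), element-by-element appends) by a slice-rebinding loop: tuple-unpack the leading (prime, exponent) pair of each remaining suffix, branch on two strict comparisons with equality as the final case, rebind the suffixes by slicing, and emit the leftover suffix with a single list concatenation instead of two copy loops; Pre_ is exactly A's domain (even-length lists; on odd lengths A raises IndexError).
import Mathlib
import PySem

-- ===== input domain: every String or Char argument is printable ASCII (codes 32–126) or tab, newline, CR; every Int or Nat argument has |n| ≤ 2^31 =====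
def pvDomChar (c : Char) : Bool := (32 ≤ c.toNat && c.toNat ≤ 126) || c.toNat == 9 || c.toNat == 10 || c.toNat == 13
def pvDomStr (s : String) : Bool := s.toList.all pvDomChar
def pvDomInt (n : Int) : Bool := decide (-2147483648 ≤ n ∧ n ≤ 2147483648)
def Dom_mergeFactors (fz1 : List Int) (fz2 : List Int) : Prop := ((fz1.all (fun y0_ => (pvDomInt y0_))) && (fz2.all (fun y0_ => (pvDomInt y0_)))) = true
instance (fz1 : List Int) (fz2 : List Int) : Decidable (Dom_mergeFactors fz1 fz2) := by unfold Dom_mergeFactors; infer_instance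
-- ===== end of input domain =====

-- B replaces A's index-synchronized while loop by a slice-rebinding loop over the list
-- suffixes with a concatenation drain (objective: simpler — shorter, no indices, no
-- exhaustion branches inside the loop).

-- ===== PORT A =====
-- Literal port of A's while loop: i, j are the Python loop counters (always nonnegative,
-- so Nat is exact); indexing uses getD 0, exact because under Pre_ every access made by
-- the loop is in range (out of range Python raises IndexError, excluded by Pre_). The
-- exhaustion tests 'i == len(fz1)' / 'j == len(fz2)' are ported as 'len ≤ i' / 'len ≤ j':
-- identical on every state the loop reaches without raising (i, j never exceed the lengths).
def mergeLoopA (fz1 : List Int) (fz2 : List Int) (i j : Nat) (fz : List Int) : List Int :=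
  if i < fz1.length ∨ j < fz2.length then
    if fz1.length ≤ i then
      mergeLoopA fz1 fz2 i (j + 2) (fz ++ [fz2.getD j 0, fz2.getD (j + 1) 0])
    else if fz2.length ≤ j then
      mergeLoopA fz1 fz2 (i + 2) j (fz ++ [fz1.getD i 0, fz1.getD (i + 1) 0])
    else if fz1.getD i 0 == fz2.getD j 0 then
      mergeLoopA fz1 fz2 (i + 2) (j + 2)
        (fz ++ [fz1.getD i 0, fz1.getD (i + 1) 0 + fz2.getD (j + 1) 0])
    else if fz1.getD i 0 < fz2.getD j 0 then
      mergeLoopA fz1 fz2 (i + 2) j (fz ++ [fz1.getD i 0, fz1.getD (i + 1) 0])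
    else
      mergeLoopA fz1 fz2 i (j + 2) (fz ++ [fz2.getD j 0, fz2.getD (j + 1) 0])
  else fz
termination_by (fz1.length - i) + (fz2.length - j)
decreasing_by all_goals omega

def mergeFactors (fz1 : List Int) (fz2 : List Int) : List Int :=
  mergeLoopA fz1 fz2 0 0 []

-- ===== PORT B =====
-- Port of Source B's while loop: the loop state is the two remaining suffixes (rebound by
-- slicing in Python) and the output accumulator. The tuple unpacking of fz1[:2] / fz2[:2]
-- is the two-element head pattern (under Pre_ both suffixes have even length, so a
-- nonempty suffix has at least two elements; on a singleton Python raises ValueError,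
-- outside Pre_, and the catch-all branch ends the loop). The final 'out + fz1 + fz2'
-- is the concatenation in the catch-all.
def altLoop (fz1 : List Int) (fz2 : List Int) (out : List Int) : List Int :=
  match fz1, fz2 with
  | p1 :: e1 :: t1, p2 :: e2 :: t2 =>
    if p1 < p2 then altLoop t1 (p2 :: e2 :: t2) (out ++ [p1, e1])
    else if p2 < p1 then altLoop (p1 :: e1 :: t1) t2 (out ++ [p2, e2])
    else altLoop t1 t2 (out ++ [p1, e1 + e2])
  | _, _ => out ++ fz1 ++ fz2

def mergeFactors_alt (fz1 : List Int) (fz2 : List Int) : List Int :=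
  altLoop fz1 fz2 []

-- ===== PRECONDITION & SPEC =====
-- A indexes fz[i] and fz[i+1] two at a time, so whenever either list has odd length it
-- raises IndexError on its trailing element; Pre_ excludes exactly those inputs (A
-- returns on every even-length pair, so Pre_ is exactly A's domain).
def Pre_mergeFactors (fz1 : List Int) (fz2 : List Int) : Prop :=
  fz1.length % 2 = 0 ∧ fz2.length % 2 = 0
instance (fz1 : List Int) (fz2 : List Int) : Decidable (Pre_mergeFactors fz1 fz2) := by
  unfold Pre_mergeFactors; infer_instance

def pvWitness_mergeFactors : List Int × List Int := ([2, 3, 5, 1], [3, 2, 7, 4])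

def Spec_mergeFactors (fz1 : List Int) (fz2 : List Int) (out : List Int) : Prop := out = mergeFactors_alt fz1 fz2
instance (fz1 : List Int) (fz2 : List Int) (out : List Int) : Decidable (Spec_mergeFactors fz1 fz2 out) := by unfold Spec_mergeFactors; infer_instance

-- ===== CLAIM (what is proved, stated in full; the proofs are below) =====
def Claim_equal_mergeFactors : Prop := ∀ (fz1 : List Int) (fz2 : List Int), Dom_mergeFactors fz1 fz2 → Pre_mergeFactors fz1 fz2 → Spec_mergeFactors fz1 fz2 (mergeFactors fz1 fz2)

-- ===== LEMMAS AND PROOFS =====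

-- The flat list as a list of (prime, exponent) pairs.
def toPairs (l : List Int) : List (Int × Int) :=
  match l with
  | p :: e :: t => (p, e) :: toPairs t
  | _ => []

-- The abstract merge of two pair lists (proof device relating the two loops).
def mergeP (l1 l2 : List (Int × Int)) : List (Int × Int) :=
  match l1, l2 with
  | [], l2 => l2
  | l1, [] => l1
  | x :: t1, y :: t2 =>
    if x.1 = y.1 then (x.1, x.2 + y.2) :: mergeP t1 t2
    else if x.1 < y.1 then x :: mergeP t1 (y :: t2)
    else y :: mergeP (x :: t1) t2

def flat (l : List (Int × Int)) : List Int := l.flatMap (fun pe => [pe.1, pe.2])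

@[simp] lemma toPairs_nil : toPairs [] = [] := rfl
@[simp] lemma toPairs_cons₂ (p e : Int) (t : List Int) :
    toPairs (p :: e :: t) = (p, e) :: toPairs t := rfl

@[simp] lemma mergeP_nil_left (l : List (Int × Int)) : mergeP [] l = l := by
  cases l <;> simp [mergeP]
@[simp] lemma mergeP_nil_right (l : List (Int × Int)) : mergeP l [] = l := by
  cases l <;> simp [mergeP]

lemma mergeP_cons_cons (x y : Int × Int) (t1 t2 : List (Int × Int)) :
    mergeP (x :: t1) (y :: t2) =
      if x.1 = y.1 then (x.1, x.2 + y.2) :: mergeP t1 t2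
      else if x.1 < y.1 then x :: mergeP t1 (y :: t2)
      else y :: mergeP (x :: t1) t2 := by
  simp [mergeP]

-- An even-length flat list is exactly its pair list, flattened.
lemma flat_toPairs : ∀ (l : List Int), l.length % 2 = 0 → flat (toPairs l) = l
  | [] => by intro _; simp [flat]
  | [x] => by intro h; simp at h
  | p :: e :: t => by
    intro h
    simp only [List.length_cons] at h
    have ht := flat_toPairs t (by omega)
    simp only [toPairs_cons₂, flat, List.flatMap_cons] at ht ⊢
    simp [ht]

-- On an even-length list, an even in-range position starts a full pair.
lemma drop_two (l : List Int) (i : Nat) (hi : i % 2 = 0) (hl : l.length % 2 = 0)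
    (h : i < l.length) :
    l.drop i = l.getD i 0 :: l.getD (i + 1) 0 :: l.drop (i + 2) := by
  have h1 : i + 1 < l.length := by omega
  rw [List.drop_eq_getElem_cons h, List.drop_eq_getElem_cons h1,
    List.getD_eq_getElem l 0 h, List.getD_eq_getElem l 0 h1]

-- A's index loop from (i, j) computes the abstract merge of the unconsumed suffixes.
lemma loopA_eq (fz1 fz2 : List Int) (h1 : fz1.length % 2 = 0) (h2 : fz2.length % 2 = 0)
    (i j : Nat) (acc : List Int) :
    i % 2 = 0 → j % 2 = 0 → i ≤ fz1.length → j ≤ fz2.length →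
    mergeLoopA fz1 fz2 i j acc
      = acc ++ flat (mergeP (toPairs (fz1.drop i)) (toPairs (fz2.drop j))) := by
  fun_induction mergeLoopA fz1 fz2 i j acc with
  | case1 i j acc hcond hlen ih =>
    intro hie hje hile hjle
    have hi : i = fz1.length := by omega
    have hj : j < fz2.length := by omega
    rw [ih hie (by omega) hile (by omega), hi, List.drop_length,
      drop_two fz2 j hje h2 hj]
    simp [flat]
  | case2 i j acc hcond hlen1 hlen2 ih =>
    intro hie hje hile hjle
    have hj : j = fz2.length := by omega
    have hi' : i < fz1.length := by omega
    rw [ih (by omega) hje (by omega) hjle, hj, List.drop_length,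
      drop_two fz1 i hie h1 hi']
    simp [flat]
  | case3 i j acc hcond hlen1 hlen2 heq ih =>
    intro hie hje hile hjle
    have hi' : i < fz1.length := by omega
    have hj' : j < fz2.length := by omega
    rw [ih (by omega) (by omega) (by omega) (by omega),
      drop_two fz1 i hie h1 hi', drop_two fz2 j hje h2 hj']
    simp only [toPairs_cons₂]
    rw [mergeP_cons_cons, if_pos (by simpa using heq)]
    simp [flat]
  | case4 i j acc hcond hlen1 hlen2 heq hlt ih =>
    intro hie hje hile hjle
    have hi' : i < fz1.length := by omega
    have hj' : j < fz2.length := by omega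
    rw [ih (by omega) hje (by omega) hjle,
      drop_two fz1 i hie h1 hi', drop_two fz2 j hje h2 hj']
    simp only [toPairs_cons₂]
    rw [mergeP_cons_cons, if_neg (by simpa using heq), if_pos hlt]
    simp [flat]
  | case5 i j acc hcond hlen1 hlen2 heq hlt ih =>
    intro hie hje hile hjle
    have hi' : i < fz1.length := by omega
    have hj' : j < fz2.length := by omega
    rw [ih hie (by omega) hile (by omega),
      drop_two fz1 i hie h1 hi', drop_two fz2 j hje h2 hj']
    simp only [toPairs_cons₂]
    rw [mergeP_cons_cons, if_neg (by simpa using heq), if_neg hlt]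
    simp [flat]
  | case6 i j acc hcond =>
    intro hie hje hile hjle
    have hi : i = fz1.length := by omega
    have hj : j = fz2.length := by omega
    rw [hi, hj, List.drop_length, List.drop_length]
    simp [flat]

-- B's slice-rebinding loop computes the same abstract merge of its two suffixes.
lemma altLoop_eq (fz1 fz2 out : List Int) :
    fz1.length % 2 = 0 → fz2.length % 2 = 0 →
    altLoop fz1 fz2 out = out ++ flat (mergeP (toPairs fz1) (toPairs fz2)) := by
  fun_induction altLoop fz1 fz2 out with
  | case1 out p1 e1 t1 p2 e2 t2 hlt ih =>
    intro hl1 hl2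
    simp only [List.length_cons] at hl1 hl2
    rw [ih (by omega) (by simp only [List.length_cons]; omega)]
    simp only [toPairs_cons₂]
    rw [mergeP_cons_cons, if_neg (by simp; omega), if_pos (by simpa using hlt)]
    simp [flat]
  | case2 out p1 e1 t1 p2 e2 t2 h1 h2 ih =>
    intro hl1 hl2
    simp only [List.length_cons] at hl1 hl2
    rw [ih (by simp only [List.length_cons]; omega) (by omega)]
    simp only [toPairs_cons₂]
    rw [mergeP_cons_cons, if_neg (by simp; omega), if_neg (by simpa using h1)]
    simp [flat]
  | case3 out p1 e1 t1 p2 e2 t2 h1 h2 ih =>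
    intro hl1 hl2
    simp only [List.length_cons] at hl1 hl2
    rw [ih (by omega) (by omega)]
    simp only [toPairs_cons₂]
    rw [mergeP_cons_cons, if_pos (by simp; omega)]
    simp [flat]
  | case4 fz1 fz2 out hno =>
    intro hl1 hl2
    -- the loop guard failed: under even lengths one of the suffixes is empty
    rcases fz1 with _ | ⟨p, _ | ⟨e, t⟩⟩
    · simp only [toPairs_nil, mergeP_nil_left]
      rw [flat_toPairs _ hl2]; simp
    · simp at hl1
    · rcases fz2 with _ | ⟨q, _ | ⟨f, s⟩⟩
      · simp only [toPairs_nil, mergeP_nil_right]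
        rw [flat_toPairs _ hl1]; simp
      · simp at hl2
      · exact (hno p e t q f s rfl rfl).elim

-- ===== VERDICT (by name: the statement is the Claim_ definition above) =====
theorem mergeFactors_spec : Claim_equal_mergeFactors := by
  intro fz1 fz2 _hdom hpre
  unfold Spec_mergeFactors mergeFactors mergeFactors_alt
  rw [loopA_eq fz1 fz2 hpre.1 hpre.2 0 0 [] rfl rfl (Nat.zero_le _) (Nat.zero_le _),
    altLoop_eq fz1 fz2 [] hpre.1 hpre.2]
  simp
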